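-- pv_equiv track=rewrite | github.com/farisjamaan/matchpoint | backend/src/services/ingestion.py | _slides_from_text
-- ===== SOURCE A (Python) =====
-- def _slides_from_text(raw: str) -> list[list[str]]:
--     """
--     Split raw text into individual slides.
--     Each slide is returned as a list of non-empty content lines.
--     Slide-marker fences (=====) and 'Slide N' header lines are discarded.
--     """
--     _SEPARATOR = "======================"
--     slides: list[list[str]] = []
--     current: list[str] = []
--
--     for line in raw.splitlines():
--         stripped = line.strip()
--         if stripped == _SEPARATOR:
--             continue
--         parts = stripped.split()
--         if len(parts) == 2 and parts[0] == "Slide" and parts[1].isdigit():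
--             if current:
--                 slides.append(current)
--                 current = []
--             continue
--         if stripped:
--             current.append(stripped)
--
--     if current:
--         slides.append(current)
--
--     return slides
-- ===== SOURCE B (Python) =====
-- _SEPARATOR = "======================"
--
--
-- def _is_slide_header(line):
--     parts = line.strip().split()
--     return len(parts) == 2 and parts[0] == "Slide" and parts[1].isdigit()
--
--
-- def _segment_content(seg):
--     return [s for s in (l.strip() for l in seg) if s and s != _SEPARATOR]
--
--
-- def _slides_from_text(raw: str) -> list[list[str]]:
--     # segmentation: repeatedly cut the line list at the first 'Slide N' header,
--     # filter each segment, keep the non-empty ones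
--     lines = raw.splitlines()
--     slides = []
--     while True:
--         i = 0
--         while i < len(lines) and not _is_slide_header(lines[i]):
--             i += 1
--         seg = _segment_content(lines[:i])
--         if seg:
--             slides.append(seg)
--         if i == len(lines):
--             return slides
--         lines = lines[i + 1:]
-- ===== Notes on version B (the rewrite author's own statement) =====
-- stated objective: alternative
-- what changed: Replaces A's single loop with a running (slides, current) accumulator by an iterative segmentation: repeatedly cut the line list at the first slide-header line, filter each segment's stripped non-empty non-separator lines, and keep the non-empty segments.
import Mathlib
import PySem

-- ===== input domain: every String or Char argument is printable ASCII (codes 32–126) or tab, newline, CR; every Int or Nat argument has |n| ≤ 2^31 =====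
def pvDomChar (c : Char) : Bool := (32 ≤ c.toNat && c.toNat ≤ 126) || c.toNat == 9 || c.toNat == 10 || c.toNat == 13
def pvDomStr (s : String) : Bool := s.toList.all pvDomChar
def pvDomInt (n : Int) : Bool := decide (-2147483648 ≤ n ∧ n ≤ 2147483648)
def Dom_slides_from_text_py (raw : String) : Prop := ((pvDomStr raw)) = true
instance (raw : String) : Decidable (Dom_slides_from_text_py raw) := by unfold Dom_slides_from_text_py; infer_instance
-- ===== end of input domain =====

-- B replaces A's running (slides, current) accumulator by an iterative segmentation that cuts the
-- line list at each slide-header line and filters each segment; alternative decomposition, same cost.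


-- ===== PORT A =====
-- one loop iteration of A: skip separator lines, flush `current` at a slide-header line,
-- append non-empty stripped lines to `current`
def pvStepA (st : List (List String) × List String) (line : String) :
    List (List String) × List String :=
  let stripped := PySem.Str.strip line
  if stripped == "======================" then st
  else
    let parts := PySem.Str.split₀ stripped
    let isHdr : Bool := match parts with
      | [p0, p1] => p0 == "Slide" && PySem.Str.strIsdigit p1
      | _ => false
    if isHdr then (if st.2 = [] then st.1 else st.1 ++ [st.2], [])
    else if stripped == "" then st
    else (st.1, st.2 ++ [stripped])

-- A's trailing 'if current: slides.append(current)'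
def pvFinishA (st : List (List String) × List String) : List (List String) :=
  if st.2 = [] then st.1 else st.1 ++ [st.2]

def slides_from_text_py (raw : String) : List (List String) :=
  pvFinishA ((PySem.Str.splitlines raw).foldl pvStepA ([], []))

-- ===== PORT B =====
def pvIsSlideHeader (line : String) : Bool :=
  match PySem.Str.split₀ (PySem.Str.strip line) with
  | [p0, p1] => p0 == "Slide" && PySem.Str.strIsdigit p1
  | _ => false

def pvSegmentContent (seg : List String) : List String :=
  (seg.map PySem.Str.strip).filter (fun s => s != "" && s != "======================")

-- B's loop: the scan to the first header index i gives lines[:i] = takeWhile and the emptiness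
-- test i == len(lines); keep the filtered segment if non-empty, continue with lines[i+1:]
def pvCollect (lines : List String) : List (List String) :=
  let seg := pvSegmentContent (lines.takeWhile (fun l => !pvIsSlideHeader l))
  let rest := lines.dropWhile (fun l => !pvIsSlideHeader l)
  if _hr : rest = [] then (if seg = [] then [] else [seg])
  else (if seg = [] then [] else [seg]) ++ pvCollect rest.tail
termination_by lines.length
decreasing_by
  have h1 := List.length_dropWhile_le (fun l => !pvIsSlideHeader l) lines
  cases hrest : lines.dropWhile (fun l => !pvIsSlideHeader l) with
  | nil => exact absurd hrest _hr
  | cons a t =>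
    rw [hrest] at h1
    simp at h1 ⊢
    omega

def slides_from_text_py_alt (raw : String) : List (List String) :=
  pvCollect (PySem.Str.splitlines raw)

-- ===== PRECONDITION & SPEC =====
def Spec_slides_from_text_py (raw : String) (out : List (List String)) : Prop := out = slides_from_text_py_alt raw
instance (raw : String) (out : List (List String)) : Decidable (Spec_slides_from_text_py raw out) := by unfold Spec_slides_from_text_py; infer_instance

-- ===== CLAIM (what is proved, stated in full; the proofs are below) =====
def Claim_equal_slides_from_text_py : Prop := ∀ (raw : String), Dom_slides_from_text_py raw → Spec_slides_from_text_py raw (slides_from_text_py raw)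

-- ===== LEMMAS AND PROOFS =====

-- 'pvCollect lines, but with `cur` prefixed to the content of the first segment'
def pvF (cur : List String) (lines : List String) : List (List String) :=
  let seg := cur ++ pvSegmentContent (lines.takeWhile (fun l => !pvIsSlideHeader l))
  let rest := lines.dropWhile (fun l => !pvIsSlideHeader l)
  if rest = [] then (if seg = [] then [] else [seg])
  else (if seg = [] then [] else [seg]) ++ pvCollect rest.tail

lemma pvF_nil_eq_collect (lines : List String) : pvF [] lines = pvCollect lines := by
  conv_lhs => rw [pvF]
  conv_rhs => rw [pvCollect]
  simp only [List.nil_append, dite_eq_ite]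

lemma pvHdr_eq (l : String) :
    (match PySem.Str.split₀ (PySem.Str.strip l) with
      | [p0, p1] => p0 == "Slide" && PySem.Str.strIsdigit p1
      | _ => false) = pvIsSlideHeader l := rfl

lemma pvStep_sep (s : List (List String)) (c : List String) (l : String)
    (hsep : (PySem.Str.strip l == "======================") = true) :
    pvStepA (s, c) l = (s, c) := by
  simp only [pvStepA, hsep, if_true]

lemma pvStep_hdr (s : List (List String)) (c : List String) (l : String)
    (hsep : (PySem.Str.strip l == "======================") = false)
    (hhdr : pvIsSlideHeader l = true) :
    pvStepA (s, c) l = (if c = [] then s else s ++ [c], []) := by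
  simp only [pvStepA, hsep, Bool.false_eq_true, if_false, pvHdr_eq, hhdr, if_true]

lemma pvStep_blank (s : List (List String)) (c : List String) (l : String)
    (hsep : (PySem.Str.strip l == "======================") = false)
    (hhdr : pvIsSlideHeader l = false)
    (hblank : (PySem.Str.strip l == "") = true) :
    pvStepA (s, c) l = (s, c) := by
  simp only [pvStepA, hsep, Bool.false_eq_true, if_false, pvHdr_eq, hhdr, hblank, if_true]

lemma pvStep_content (s : List (List String)) (c : List String) (l : String)
    (hsep : (PySem.Str.strip l == "======================") = false)
    (hhdr : pvIsSlideHeader l = false)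
    (hblank : (PySem.Str.strip l == "") = false) :
    pvStepA (s, c) l = (s, c ++ [PySem.Str.strip l]) := by
  simp only [pvStepA, hsep, Bool.false_eq_true, if_false, pvHdr_eq, hhdr, hblank]

lemma pvF_cons_skip (cur : List String) (l : String) (tl : List String)
    (hhdr : pvIsSlideHeader l = false)
    (hfilt : (PySem.Str.strip l != "" && PySem.Str.strip l != "======================") = false) :
    pvF cur (l :: tl) = pvF cur tl := by
  simp [pvF, pvSegmentContent, hhdr, hfilt]

lemma pvF_cons_content (cur : List String) (l : String) (tl : List String)
    (hhdr : pvIsSlideHeader l = false)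
    (hfilt : (PySem.Str.strip l != "" && PySem.Str.strip l != "======================") = true) :
    pvF cur (l :: tl) = pvF (cur ++ [PySem.Str.strip l]) tl := by
  simp [pvF, pvSegmentContent, hhdr, hfilt]

lemma pvF_cons_hdr (cur : List String) (l : String) (tl : List String)
    (hhdr : pvIsSlideHeader l = true) :
    pvF cur (l :: tl) = (if cur = [] then [] else [cur]) ++ pvCollect tl := by
  rw [pvF]
  simp [pvSegmentContent, hhdr]

lemma pvMain (lines : List String) : ∀ slides cur,
    pvFinishA (lines.foldl pvStepA (slides, cur)) = slides ++ pvF cur lines := by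
  induction lines with
  | nil =>
    intro s c
    simp only [List.foldl_nil, pvFinishA, pvF, pvSegmentContent, List.takeWhile_nil,
      List.dropWhile_nil, List.map_nil, List.filter_nil, List.append_nil]
    split <;> simp_all
  | cons l tl ih =>
    intro s c
    rw [List.foldl_cons]
    by_cases hsep : (PySem.Str.strip l == "======================") = true
    · have hstr : PySem.Str.strip l = "======================" := eq_of_beq hsep
      have hhdr : pvIsSlideHeader l = false := by
        simp only [pvIsSlideHeader, hstr]; decide
      have hfilt : (PySem.Str.strip l != "" && PySem.Str.strip l != "======================")
          = false := by rw [hstr]; decide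
      rw [pvStep_sep s c l hsep, ih, pvF_cons_skip c l tl hhdr hfilt]
    · have hsep' : (PySem.Str.strip l == "======================") = false := by
        simp only [Bool.not_eq_true] at hsep; exact hsep
      by_cases hhdr : pvIsSlideHeader l = true
      · rw [pvStep_hdr s c l hsep' hhdr, ih, pvF_nil_eq_collect, pvF_cons_hdr c l tl hhdr]
        by_cases hc : c = [] <;> simp [hc]
      · have hhdr' : pvIsSlideHeader l = false := by
          simp only [Bool.not_eq_true] at hhdr; exact hhdr
        by_cases hblank : (PySem.Str.strip l == "") = true
        · have hstr0 : PySem.Str.strip l = "" := eq_of_beq hblank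
          have hfilt : (PySem.Str.strip l != "" && PySem.Str.strip l != "======================")
              = false := by rw [hstr0]; decide
          rw [pvStep_blank s c l hsep' hhdr' hblank, ih, pvF_cons_skip c l tl hhdr' hfilt]
        · have hblank' : (PySem.Str.strip l == "") = false := by
            simp only [Bool.not_eq_true] at hblank; exact hblank
          have hfilt : (PySem.Str.strip l != "" && PySem.Str.strip l != "======================")
              = true := by
            rw [Bool.and_eq_true, bne_iff_ne, bne_iff_ne]
            refine ⟨?_, ?_⟩
            · intro h; rw [h] at hblank'; simp at hblank'
            · intro h; rw [h] at hsep'; simp at hsep'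
          rw [pvStep_content s c l hsep' hhdr' hblank', ih, pvF_cons_content c l tl hhdr' hfilt]

-- ===== VERDICT (by name: the statement is the Claim_ definition above) =====
theorem slides_from_text_py_spec : Claim_equal_slides_from_text_py := by
  intro raw _
  unfold Spec_slides_from_text_py slides_from_text_py slides_from_text_py_alt
  rw [pvMain, pvF_nil_eq_collect]
  simp
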